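-- pv_equiv track=rewrite | github.com/flynndoh/cplex-network-optimisation | results/output-values.py | determine_transit_loads
-- ===== SOURCE A (Python) =====
-- def determine_transit_loads(all_demand_flows):
--     """ Iterates through all demand flows and returns the transit loads. """
--     transit_loads = {}
--
--     for demand_flow in all_demand_flows:
--         flow = demand_flow[1]
--         transit_node = demand_flow[0][2]
--
--         load = transit_loads.get(transit_node)
--         if (load != None):
--             load += flow
--             transit_loads.update({transit_node:load})
--         else:
--             transit_loads.update({transit_node:flow})
--
--     return transit_loads
-- ===== SOURCE B (Python) =====
-- def determine_transit_loads(all_demand_flows):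
--     """Group-by re-implementation: collect (node, flow) pairs once, then one
--     dict comprehension over the distinct nodes in first-occurrence order,
--     summing each node's flows."""
--     pairs = [(df[0][2], df[1]) for df in all_demand_flows]
--     return {n: sum(f for m, f in pairs if m == n)
--             for n in dict.fromkeys(m for m, _ in pairs)}
-- ===== Notes on version B (the rewrite author's own statement) =====
-- stated objective: alternative
-- what changed: Replaces the incremental get/update dict accumulator with a group-by decomposition: extract (node, flow) pairs, deduplicate the nodes in first-occurrence order, and build the result in one dict comprehension summing each node's flows.
import Mathlib
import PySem

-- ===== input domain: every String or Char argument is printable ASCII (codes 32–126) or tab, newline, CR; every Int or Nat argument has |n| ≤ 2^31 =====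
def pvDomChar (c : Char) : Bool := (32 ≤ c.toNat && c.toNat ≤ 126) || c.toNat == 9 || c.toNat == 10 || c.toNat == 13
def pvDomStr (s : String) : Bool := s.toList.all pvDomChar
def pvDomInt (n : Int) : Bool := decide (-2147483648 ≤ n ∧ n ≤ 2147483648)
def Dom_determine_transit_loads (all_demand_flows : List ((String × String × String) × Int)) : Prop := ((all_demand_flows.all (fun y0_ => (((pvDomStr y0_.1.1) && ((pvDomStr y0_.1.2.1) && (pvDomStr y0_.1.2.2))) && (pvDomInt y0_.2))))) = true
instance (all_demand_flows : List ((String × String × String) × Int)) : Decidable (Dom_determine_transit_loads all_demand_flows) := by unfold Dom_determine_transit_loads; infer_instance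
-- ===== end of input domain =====

-- B replaces A's incremental get/update dict accumulator with a group-by
-- decomposition (distinct nodes in first-occurrence order, one sum per node);
-- objective: alternative (not faster).

-- ===== PORT A =====
def determine_transit_loads (all_demand_flows : List ((String × String × String) × Int)) : List (String × Int) :=
  (all_demand_flows.foldl
    (fun transit_loads demand_flow =>
      let flow := demand_flow.2
      let transit_node := demand_flow.1.2.2
      match transit_loads.get? transit_node with
      | some load => transit_loads.insert transit_node (load + flow)
      | none => transit_loads.insert transit_node flow)
    (PySem.Dict.empty : PySem.Dict String Int)).items

-- ===== PORT B =====
def determine_transit_loads_alt (all_demand_flows : List ((String × String × String) × Int)) : List (String × Int) :=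
  let pairs := all_demand_flows.map (fun df => (df.1.2.2, df.2))
  -- dict comprehension over distinct keys in first-occurrence order = that list of pairs
  (PySem.List.dedup (pairs.map Prod.fst)).map
    (fun n => (n, ((pairs.filter (fun p => p.1 == n)).map Prod.snd).sum))

-- ===== PRECONDITION & SPEC =====
def Spec_determine_transit_loads (all_demand_flows : List ((String × String × String) × Int)) (out : List (String × Int)) : Prop := out = determine_transit_loads_alt all_demand_flows
instance (all_demand_flows : List ((String × String × String) × Int)) (out : List (String × Int)) : Decidable (Spec_determine_transit_loads all_demand_flows out) := by unfold Spec_determine_transit_loads; infer_instance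

-- ===== CLAIM (what is proved, stated in full; the proofs are below) =====
def Claim_equal_determine_transit_loads : Prop := ∀ (all_demand_flows : List ((String × String × String) × Int)), Dom_determine_transit_loads all_demand_flows → Spec_determine_transit_loads all_demand_flows (determine_transit_loads all_demand_flows)

-- ===== LEMMAS AND PROOFS =====

-- A's loop body (get, branch, insert) is extensionally "insert key (getD key 0 + flow)".
lemma stepA_eq (d : PySem.Dict String Int) (df : (String × String × String) × Int) :
    (match d.get? df.1.2.2 with
     | some load => d.insert df.1.2.2 (load + df.2)
     | none => d.insert df.1.2.2 df.2)
    = d.insert df.1.2.2 (d.getD df.1.2.2 0 + df.2) := by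
  rcases h : d.get? df.1.2.2 with _ | load
  · simp [PySem.Dict.getD_of_get?_eq_none _ _ h]
  · simp [PySem.Dict.getD_of_get?_eq_some _ _ h]

-- lookup in the accumulated dict = sum of the flows of that key seen so far
lemma getD_fold (l : List ((String × String × String) × Int)) (d : PySem.Dict String Int) (c : String) :
    (l.foldl (fun d df => d.insert df.1.2.2 (d.getD df.1.2.2 0 + df.2)) d).getD c 0
      = d.getD c 0 + ((l.filter (fun df => df.1.2.2 == c)).map (·.2)).sum := by
  induction l generalizing d with
  | nil => simp
  | cons x xs ih =>
    simp only [List.foldl_cons, ih, List.filter_cons]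
    by_cases hx : x.1.2.2 = c
    · simp [hx, PySem.Dict.getD_insert_self]; ring
    · rw [PySem.Dict.getD_insert_of_ne _ _ _ (Ne.symm hx)]
      simp [hx]

-- ===== VERDICT (by name: the statement is the Claim_ definition above) =====
theorem determine_transit_loads_spec : Claim_equal_determine_transit_loads := by
  intro l _
  unfold Spec_determine_transit_loads determine_transit_loads determine_transit_loads_alt
  have hstep : l.foldl
      (fun transit_loads demand_flow =>
        let flow := demand_flow.2
        let transit_node := demand_flow.1.2.2
        match transit_loads.get? transit_node with
        | some load => transit_loads.insert transit_node (load + flow)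
        | none => transit_loads.insert transit_node flow)
      (PySem.Dict.empty : PySem.Dict String Int)
      = l.foldl (fun d df => d.insert df.1.2.2 (d.getD df.1.2.2 0 + df.2)) PySem.Dict.empty := by
    congr 1
    funext d df
    exact stepA_eq d df
  rw [hstep]
  have hnd : (l.foldl (fun d df => d.insert df.1.2.2 (d.getD df.1.2.2 0 + df.2))
      (PySem.Dict.empty : PySem.Dict String Int)).keys.Nodup := by
    exact PySem.Dict.nodup_keys_foldl_insert_key l (fun df => df.1.2.2) _ _ PySem.Dict.nodup_keys_empty
  rw [PySem.Dict.items_eq_map_keys _ hnd 0]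
  rw [PySem.Dict.keys_foldl_insert_key]
  simp only [PySem.Dict.keys_empty, PySem.Set.update_nil_left, getD_fold, PySem.Dict.getD_empty,
    zero_add, PySem.List.dedup_eq_ofList, List.map_map, List.filter_map, List.map_map]
  rfl
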